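-- pv_equiv track=rewrite | github.com/levlai/chiralipy | chiralipy/transform/aromaticity.py | _check_fused
-- ===== SOURCE A (Python) =====
-- def _check_fused(
--
--     ring_ids: list[int],
--     neigh_map: dict[int, list[int]],
-- ) -> bool:
--     """Check if a set of rings forms a connected fused system.
--
--     Args:
--         ring_ids: List of ring indices.
--         neigh_map: Ring neighbor map.
--
--     Returns:
--         True if rings are connected.
--     """
--     if len(ring_ids) <= 1:
--         return True
--
--     # BFS from first ring
--     visited: set[int] = set()
--     ring_set = set(ring_ids)
--     queue = [ring_ids[0]]
--
--     while queue:
--         curr = queue.pop(0)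
--         if curr in visited:
--             continue
--         visited.add(curr)
--
--         for neigh in neigh_map.get(curr, []):
--             if neigh in ring_set and neigh not in visited:
--                 queue.append(neigh)
--
--     return len(visited) == len(ring_ids)
-- ===== SOURCE B (Python) =====
-- def _check_fused(
--     ring_ids: list[int],
--     neigh_map: dict[int, list[int]],
-- ) -> bool:
--     """Check if a set of rings forms a connected fused system (round-based closure)."""
--     if len(ring_ids) <= 1:
--         return True
--
--     ring_set = set(ring_ids)
--     # Grow the set reachable from the first ring by whole one-step expansions;
--     # |ring_set| rounds are enough to reach the fixpoint.
--     reach = {ring_ids[0]}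
--     for _ in range(len(ring_set)):
--         reach = reach | {n for r in reach for n in neigh_map.get(r, []) if n in ring_set}
--
--     return len(reach) == len(ring_ids)
-- ===== Notes on version B (the rewrite author's own statement) =====
-- stated objective: alternative
-- what changed: Replaces the queue-based BFS (visited set + FIFO queue with per-node dequeue/enqueue) by a round-based closure: the reachable set is grown by |ring_set| whole one-step frontier expansions and compared against len(ring_ids); no queue, no visited bookkeeping.
import Mathlib
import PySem

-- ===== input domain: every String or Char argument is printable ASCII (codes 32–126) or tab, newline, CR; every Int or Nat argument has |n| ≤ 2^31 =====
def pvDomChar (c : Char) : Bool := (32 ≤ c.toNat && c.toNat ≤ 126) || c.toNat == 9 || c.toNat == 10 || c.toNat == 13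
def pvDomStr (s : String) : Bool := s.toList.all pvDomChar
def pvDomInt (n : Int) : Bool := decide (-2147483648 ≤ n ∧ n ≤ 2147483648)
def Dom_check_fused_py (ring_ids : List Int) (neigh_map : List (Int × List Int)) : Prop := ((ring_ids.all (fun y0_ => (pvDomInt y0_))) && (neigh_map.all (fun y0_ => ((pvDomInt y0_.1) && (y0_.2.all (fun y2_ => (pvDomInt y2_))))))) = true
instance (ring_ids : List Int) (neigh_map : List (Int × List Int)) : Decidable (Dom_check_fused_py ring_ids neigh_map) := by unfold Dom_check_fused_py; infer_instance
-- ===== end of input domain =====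

-- B replaces A's queue-based BFS by round-based frontier expansion (a different
-- connectivity algorithm of similar cost); equal return value on every input.

-- neigh_map.get(r, []) — shared by both ports (both Pythons make this same dict lookup)
def pvAdj (neigh_map : List (Int × List Int)) (r : Int) : List Int :=
  PySem.Dict.getD (PySem.Dict.mk neigh_map) r []

-- used by bfsA's termination measure: a dict value is no longer than the sum of all values
theorem pvAdj_len_le (neigh_map : List (Int × List Int)) (r : Int) :
    (pvAdj neigh_map r).length ≤ (neigh_map.map (fun p => p.2.length)).sum := by
  induction neigh_map with
  | nil => simp [pvAdj, PySem.Dict.getD, PySem.Dict.get?]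
  | cons p rest ih =>
    simp only [pvAdj, PySem.Dict.getD] at *
    rw [PySem.Dict.get?_mk_cons]
    by_cases h : (p.1 == r) = true
    · simp [h]
    · simp only [h, Bool.false_eq_true, ite_false, List.map_cons, List.sum_cons]
      omega

-- used by bfsA's termination measure: a fresh member of rs failing q but passing p
-- makes the q-count strictly smaller
theorem pvCountP_lt (rs : List Int) (p q : Int → Bool)
    (hmono : ∀ x, q x = true → p x = true) (curr : Int) (hrs : curr ∈ rs)
    (hp : p curr = true) (hq : q curr = false) : rs.countP q < rs.countP p := by
  obtain ⟨l1, l2, rfl⟩ := List.append_of_mem hrs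
  have h1 : l1.countP q ≤ l1.countP p := List.countP_mono_left (fun x _ => hmono x)
  have h2 : l2.countP q ≤ l2.countP p := List.countP_mono_left (fun x _ => hmono x)
  simp [List.countP_append, hp, hq]
  omega

-- ===== PORT A =====
-- the BFS while-loop of A; the Prop argument hq records that every queued id is in ring_set
-- (it does not influence the computation; it is needed for the termination measure)
def bfsA (neigh_map : List (Int × List Int)) (ring_set : PySem.Set Int)
    (visited : PySem.Set Int) (queue : List Int)
    (hq : ∀ x ∈ queue, x ∈ ring_set) : PySem.Set Int :=
  match queue with
  | [] => visited
  | curr :: rest =>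
    if hv : curr ∈ visited then
      bfsA neigh_map ring_set visited rest
        (fun x hx => hq x (List.mem_cons_of_mem _ hx))
    else
      bfsA neigh_map ring_set (visited.add curr)
        (rest ++ (pvAdj neigh_map curr).filter
          (fun n => ring_set.contains n && !((visited.add curr).contains n)))
        (fun x hx => by
          rcases List.mem_append.mp hx with h | h
          · exact hq x (List.mem_cons_of_mem _ h)
          · have := (List.mem_filter.mp h).2
            have := (Bool.and_eq_true _ _).mp this |>.1
            exact (PySem.Set.contains_iff _ _).mp this)
  termination_by ((ring_set.filter (fun x => decide (x ∉ visited))).length) *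
      ((neigh_map.map (fun p => p.2.length)).sum + 1) + queue.length
  decreasing_by
  · simp only [List.length_cons]; omega
  · have hcur : curr ∈ ring_set := hq curr List.mem_cons_self
    have hlt : (ring_set.filter (fun x => decide (x ∉ visited.add curr))).length <
        (ring_set.filter (fun x => decide (x ∉ visited))).length := by
      rw [← List.countP_eq_length_filter, ← List.countP_eq_length_filter]
      refine pvCountP_lt _ _ _ (fun x hx => ?_) curr hcur (by simpa using hv)
        (by simp [(PySem.Set.mem_add visited curr curr).mpr (Or.inr rfl)])
      simp only [decide_eq_true_eq] at *
      intro hmem; exact hx ((PySem.Set.mem_add _ _ _).mpr (Or.inl hmem))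
    have hfl : ((pvAdj neigh_map curr).filter
        (fun n => ring_set.contains n && !((visited.add curr).contains n))).length ≤
        (neigh_map.map (fun p => p.2.length)).sum :=
      le_trans (List.length_filter_le _ _) (pvAdj_len_le neigh_map curr)
    simp only [List.length_append, List.length_cons]
    have := hlt
    nlinarith [hlt, hfl]

def check_fused_py (ring_ids : List Int) (neigh_map : List (Int × List Int)) : Bool :=
  if h : ring_ids.length ≤ 1 then true
  else
    (bfsA neigh_map (PySem.Set.ofList ring_ids) PySem.Set.empty [ring_ids.headI]
      (fun x hx => by
        have hx' : x = ring_ids.headI := by simpa using hx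
        subst hx'
        rw [PySem.Set.mem_ofList]
        cases ring_ids with
        | nil => simp at h
        | cons a l => simp [List.headI])).length == ring_ids.length

-- ===== PORT B =====
def check_fused_py_alt (ring_ids : List Int) (neigh_map : List (Int × List Int)) : Bool :=
  if ring_ids.length ≤ 1 then true
  else
    let ring_set := PySem.Set.ofList ring_ids
    let reach := List.foldl
      (fun X _ => X.union (PySem.Set.ofList
        (X.flatMap (fun r => (pvAdj neigh_map r).filter (fun n => ring_set.contains n)))))
      (PySem.Set.ofList [ring_ids.headI]) (List.range ring_set.length)
    reach.length == ring_ids.length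

-- ===== PRECONDITION & SPEC =====
def Spec_check_fused_py (ring_ids : List Int) (neigh_map : List (Int × List Int)) (out : Bool) : Prop := out = check_fused_py_alt ring_ids neigh_map
instance (ring_ids : List Int) (neigh_map : List (Int × List Int)) (out : Bool) : Decidable (Spec_check_fused_py ring_ids neigh_map out) := by unfold Spec_check_fused_py; infer_instance

-- ===== CLAIM (what is proved, stated in full; the proofs are below) =====
def Claim_equal_check_fused_py : Prop := ∀ (ring_ids : List Int) (neigh_map : List (Int × List Int)), Dom_check_fused_py ring_ids neigh_map → Spec_check_fused_py ring_ids neigh_map (check_fused_py ring_ids neigh_map)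

-- ===== LEMMAS AND PROOFS =====

def pvClosed (nm : List (Int × List Int)) (rs : PySem.Set Int) (V : List Int) : Prop :=
  ∀ r ∈ V, ∀ n ∈ pvAdj nm r, n ∈ rs → n ∈ V

theorem bfsA_mem_start (nm : List (Int × List Int)) (rs v : PySem.Set Int) (q : List Int)
    (hq : ∀ x ∈ q, x ∈ rs) (y : Int) (h : y ∈ v ∨ y ∈ q) : y ∈ bfsA nm rs v q hq := by
  fun_induction bfsA with
  | case1 => simpa using h
  | case2 v curr rest hq1 hv hq2 ih =>
    apply ih
    rcases h with h | h
    · exact Or.inl h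
    · rcases List.mem_cons.mp h with h | h
      · exact Or.inl (h ▸ hv)
      · exact Or.inr h
  | case3 v curr rest hq1 hv hq2 ih =>
    apply ih
    rcases h with h | h
    · exact Or.inl ((PySem.Set.mem_add _ _ _).mpr (Or.inl h))
    · rcases List.mem_cons.mp h with h | h
      · exact Or.inl ((PySem.Set.mem_add _ _ _).mpr (Or.inr h))
      · exact Or.inr (List.mem_append.mpr (Or.inl h))

theorem bfsA_closed (nm : List (Int × List Int)) (rs v : PySem.Set Int) (q : List Int)
    (hq : ∀ x ∈ q, x ∈ rs)
    (hinv : ∀ r ∈ v, ∀ n ∈ pvAdj nm r, n ∈ rs → n ∈ v ∨ n ∈ q) :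
    pvClosed nm rs (bfsA nm rs v q hq) := by
  fun_induction bfsA with
  | case1 v hq2 =>
    intro r hr n hn hnrs
    rcases hinv r hr n hn hnrs with h | h
    · exact h
    · simp at h
  | case2 v curr rest hq1 hv hq2 ih =>
    apply ih
    intro r hr n hn hnrs
    rcases hinv r hr n hn hnrs with h | h
    · exact Or.inl h
    · rcases List.mem_cons.mp h with h | h
      · exact Or.inl (h ▸ hv)
      · exact Or.inr h
  | case3 v curr rest hq1 hv hq2 ih =>
    apply ih
    intro r hr n hn hnrs
    rcases (PySem.Set.mem_add _ _ _).mp hr with hr' | hr'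
    · rcases hinv r hr' n hn hnrs with h | h
      · exact Or.inl ((PySem.Set.mem_add _ _ _).mpr (Or.inl h))
      · rcases List.mem_cons.mp h with h | h
        · exact Or.inl ((PySem.Set.mem_add _ _ _).mpr (Or.inr h))
        · exact Or.inr (List.mem_append.mpr (Or.inl h))
    · subst hr'
      by_cases hmem : n ∈ v.add r
      · exact Or.inl hmem
      · refine Or.inr (List.mem_append.mpr (Or.inr ?_))
        refine List.mem_filter.mpr ⟨hn, ?_⟩
        simp only [Bool.and_eq_true, Bool.not_eq_true']
        exact ⟨(PySem.Set.contains_iff _ _).mpr hnrs,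
          by simpa using fun hc => hmem ((PySem.Set.contains_iff _ _).mp hc)⟩

theorem bfsA_subset (nm : List (Int × List Int)) (rs v : PySem.Set Int) (q : List Int)
    (hq : ∀ x ∈ q, x ∈ rs) (M : List Int)
    (hvM : ∀ x ∈ v, x ∈ M) (hqM : ∀ x ∈ q, x ∈ M) (hM : pvClosed nm rs M) :
    ∀ y ∈ bfsA nm rs v q hq, y ∈ M := by
  fun_induction bfsA with
  | case1 => exact hvM
  | case2 v curr rest hq1 hv hq2 ih =>
    exact ih hvM (fun x hx => hqM x (List.mem_cons_of_mem _ hx))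
  | case3 v curr rest hq1 hv hq2 ih =>
    have hcM : curr ∈ M := hqM curr List.mem_cons_self
    apply ih
    · intro x hx
      rcases (PySem.Set.mem_add _ _ _).mp hx with h | h
      · exact hvM x h
      · exact h ▸ hcM
    · intro x hx
      rcases List.mem_append.mp hx with h | h
      · exact hqM x (List.mem_cons_of_mem _ h)
      · have h2 := (List.mem_filter.mp h)
        have h3 := (Bool.and_eq_true _ _).mp h2.2 |>.1
        exact hM curr hcM x h2.1 ((PySem.Set.contains_iff _ _).mp h3)

theorem bfsA_nodup (nm : List (Int × List Int)) (rs v : PySem.Set Int) (q : List Int)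
    (hq : ∀ x ∈ q, x ∈ rs) (hv : v.Nodup) : (bfsA nm rs v q hq).Nodup := by
  fun_induction bfsA with
  | case1 => exact hv
  | case2 v curr rest hq1 hvv hq2 ih => exact ih hv
  | case3 v curr rest hq1 hvv hq2 ih => exact ih (PySem.Set.nodup_add _ _ hv)

def pvIter (nm : List (Int × List Int)) (rs : PySem.Set Int) (s : Int) (k : Nat) : PySem.Set Int :=
  List.foldl
    (fun X _ => X.union (PySem.Set.ofList
      (X.flatMap (fun r => (pvAdj nm r).filter (fun n => rs.contains n)))))
    (PySem.Set.ofList [s]) (List.range k)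

theorem pvIter_succ (nm : List (Int × List Int)) (rs : PySem.Set Int) (s : Int) (k : Nat) :
    pvIter nm rs s (k + 1) = (pvIter nm rs s k).union (PySem.Set.ofList
      ((pvIter nm rs s k).flatMap (fun r => (pvAdj nm r).filter (fun n => rs.contains n)))) := by
  unfold pvIter
  rw [List.range_succ, List.foldl_append]
  rfl

theorem pvIter_mem_succ (nm : List (Int × List Int)) (rs : PySem.Set Int) (s : Int) (k : Nat) (y : Int) :
    y ∈ pvIter nm rs s (k + 1) ↔
      y ∈ pvIter nm rs s k ∨ ∃ r ∈ pvIter nm rs s k, y ∈ pvAdj nm r ∧ y ∈ rs := by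
  rw [pvIter_succ, PySem.Set.mem_union, PySem.Set.mem_ofList, List.mem_flatMap]
  constructor
  · rintro (h | ⟨r, hr, hy⟩)
    · exact Or.inl h
    · have := List.mem_filter.mp hy
      exact Or.inr ⟨r, hr, this.1, (PySem.Set.contains_iff _ _).mp this.2⟩
  · rintro (h | ⟨r, hr, h1, h2⟩)
    · exact Or.inl h
    · exact Or.inr ⟨r, hr, List.mem_filter.mpr ⟨h1, (PySem.Set.contains_iff _ _).mpr h2⟩⟩

theorem pvIter_mem_zero (nm : List (Int × List Int)) (rs : PySem.Set Int) (s : Int) (y : Int) :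
    y ∈ pvIter nm rs s 0 ↔ y = s := by
  unfold pvIter
  simp [PySem.Set.mem_ofList]

theorem pvIter_mono (nm : List (Int × List Int)) (rs : PySem.Set Int) (s : Int) (j k : Nat)
    (h : j ≤ k) (y : Int) (hy : y ∈ pvIter nm rs s j) : y ∈ pvIter nm rs s k := by
  induction k with
  | zero => simpa [Nat.le_zero.mp h] using hy
  | succ k ih =>
    rcases Nat.lt_or_ge j (k+1) with hlt | hge
    · exact (pvIter_mem_succ nm rs s k y).mpr (Or.inl (ih (Nat.lt_succ_iff.mp hlt)))
    · simpa [Nat.le_antisymm h hge] using hy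

theorem pvIter_subset_rs (nm : List (Int × List Int)) (rs : PySem.Set Int) (s : Int)
    (hs : s ∈ rs) (k : Nat) : ∀ y ∈ pvIter nm rs s k, y ∈ rs := by
  induction k with
  | zero => intro y hy; rw [pvIter_mem_zero] at hy; exact hy ▸ hs
  | succ k ih =>
    intro y hy
    rcases (pvIter_mem_succ nm rs s k y).mp hy with h | ⟨r, _, _, h⟩
    · exact ih y h
    · exact h

theorem pvIter_nodup (nm : List (Int × List Int)) (rs : PySem.Set Int) (s : Int) (k : Nat) :
    (pvIter nm rs s k).Nodup := by
  induction k with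
  | zero => exact PySem.Set.nodup_ofList _
  | succ k ih => rw [pvIter_succ]; exact PySem.Set.nodup_union _ _ ih

theorem pvIter_sub_closed (nm : List (Int × List Int)) (rs : PySem.Set Int) (s : Int)
    (M : List Int) (hsM : s ∈ M) (hM : pvClosed nm rs M) (k : Nat) :
    ∀ y ∈ pvIter nm rs s k, y ∈ M := by
  induction k with
  | zero => intro y hy; rw [pvIter_mem_zero] at hy; exact hy ▸ hsM
  | succ k ih =>
    intro y hy
    rcases (pvIter_mem_succ nm rs s k y).mp hy with h | ⟨r, hr, h1, h2⟩
    · exact ih y h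
    · exact hM r (ih r hr) y h1 h2

-- membership-congruence of one expansion round
theorem pvIter_step_congr (nm : List (Int × List Int)) (rs : PySem.Set Int) (s : Int) (j k : Nat)
    (h : ∀ x, x ∈ pvIter nm rs s j ↔ x ∈ pvIter nm rs s k) :
    ∀ x, x ∈ pvIter nm rs s (j+1) ↔ x ∈ pvIter nm rs s (k+1) := by
  intro x
  rw [pvIter_mem_succ, pvIter_mem_succ]
  constructor
  · rintro (hx | ⟨r, hr, h1, h2⟩)
    · exact Or.inl ((h x).mp hx)
    · exact Or.inr ⟨r, (h r).mp hr, h1, h2⟩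
  · rintro (hx | ⟨r, hr, h1, h2⟩)
    · exact Or.inl ((h x).mpr hx)
    · exact Or.inr ⟨r, (h r).mpr hr, h1, h2⟩

theorem pvIter_stable (nm : List (Int × List Int)) (rs : PySem.Set Int) (s : Int) (k : Nat)
    (h : ∀ x, x ∈ pvIter nm rs s (k+1) ↔ x ∈ pvIter nm rs s k) (j : Nat) (hj : k ≤ j) :
    ∀ x, x ∈ pvIter nm rs s j ↔ x ∈ pvIter nm rs s k := by
  induction j with
  | zero => intro x; rw [Nat.le_zero.mp hj]
  | succ j ih =>
    rcases Nat.lt_or_ge k (j+1) with hlt | hge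
    · have hkj := Nat.lt_succ_iff.mp hlt
      intro x
      rw [pvIter_step_congr nm rs s j k (ih hkj) x]
      exact h x
    · intro x; rw [Nat.le_antisymm hj hge]

theorem pvIter_exists_stable (nm : List (Int × List Int)) (rs : PySem.Set Int) (s : Int)
    (hnd : rs.Nodup) (hs : s ∈ rs) :
    ∃ k < rs.length, ∀ x, x ∈ pvIter nm rs s (k+1) ↔ x ∈ pvIter nm rs s k := by
  by_contra hcon
  push Not at hcon
  have grow : ∀ k < rs.length, ∃ x, x ∈ pvIter nm rs s (k+1) ∧ x ∉ pvIter nm rs s k := by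
    intro k hk
    obtain ⟨x, hx⟩ := hcon k hk
    rcases hx with ⟨h1, h2⟩ | ⟨h1, h2⟩
    · exact ⟨x, h1, h2⟩
    · exact absurd (pvIter_mono nm rs s k (k+1) (Nat.le_succ _) x h2) h1
  have hcard : ∀ k ≤ rs.length, k + 1 ≤ (pvIter nm rs s k).toFinset.card := by
    intro k hk
    induction k with
    | zero =>
      have : s ∈ (pvIter nm rs s 0).toFinset := by
        rw [List.mem_toFinset, pvIter_mem_zero]
      exact Finset.card_pos.mpr ⟨s, this⟩
    | succ k ih =>
      have hk' : k ≤ rs.length := Nat.le_of_succ_le hk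
      have hlt : k < rs.length := Nat.lt_of_succ_le hk
      obtain ⟨x, hx1, hx2⟩ := grow k hlt
      have hss : (pvIter nm rs s k).toFinset ⊂ (pvIter nm rs s (k+1)).toFinset := by
        constructor
        · intro y hy
          rw [List.mem_toFinset] at *
          exact pvIter_mono nm rs s k (k+1) (Nat.le_succ _) y hy
        · intro hsub
          exact hx2 (List.mem_toFinset.mp (hsub (List.mem_toFinset.mpr hx1)))
      have := Finset.card_lt_card hss
      have := ih hk'
      omega
  have hub : (pvIter nm rs s rs.length).toFinset.card ≤ rs.length := by
    have hsub : (pvIter nm rs s rs.length).toFinset ⊆ rs.toFinset := by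
      intro y hy
      rw [List.mem_toFinset] at *
      exact pvIter_subset_rs nm rs s hs rs.length y hy
    calc (pvIter nm rs s rs.length).toFinset.card ≤ rs.toFinset.card :=
          Finset.card_le_card hsub
      _ = rs.length := by rw [List.toFinset_card_of_nodup hnd]
  have := hcard rs.length (Nat.le_refl _)
  omega

theorem pvIter_closed (nm : List (Int × List Int)) (rs : PySem.Set Int) (s : Int)
    (hnd : rs.Nodup) (hs : s ∈ rs) : pvClosed nm rs (pvIter nm rs s rs.length) := by
  obtain ⟨k, hk, hstab⟩ := pvIter_exists_stable nm rs s hnd hs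
  have hm : ∀ x, x ∈ pvIter nm rs s rs.length ↔ x ∈ pvIter nm rs s k :=
    pvIter_stable nm rs s k hstab rs.length (Nat.le_of_lt hk)
  intro r hr n hn hnrs
  rw [hm n]
  rw [← hstab n, pvIter_mem_succ]
  exact Or.inr ⟨r, (hm r).mp hr, hn, hnrs⟩

theorem pvLen_eq (a b : List Int) (ha : a.Nodup) (hb : b.Nodup)
    (h : ∀ y, y ∈ a ↔ y ∈ b) : a.length = b.length := by
  have ht : a.toFinset = b.toFinset := by
    apply Finset.ext
    intro y
    rw [List.mem_toFinset, List.mem_toFinset]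
    exact h y
  rw [← List.toFinset_card_of_nodup ha, ht, List.toFinset_card_of_nodup hb]


-- ===== VERDICT (by name: the statement is the Claim_ definition above) =====
theorem check_fused_py_spec : Claim_equal_check_fused_py := by
  intro ring_ids nm _
  unfold Spec_check_fused_py check_fused_py check_fused_py_alt
  by_cases h : ring_ids.length ≤ 1
  · simp [h]
  · rw [dif_neg h, if_neg h]
    have hne : ring_ids ≠ [] := by intro e; subst e; simp at h
    have hs : ring_ids.headI ∈ PySem.Set.ofList ring_ids := by
      rw [PySem.Set.mem_ofList]
      cases ring_ids with
      | nil => exact absurd rfl hne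
      | cons a l => simp [List.headI]
    have hnd : (PySem.Set.ofList ring_ids).Nodup := PySem.Set.nodup_ofList _
    have key : ∀ (hqp : ∀ x ∈ [ring_ids.headI], x ∈ PySem.Set.ofList ring_ids),
        (bfsA nm (PySem.Set.ofList ring_ids) PySem.Set.empty [ring_ids.headI] hqp).length =
        (pvIter nm (PySem.Set.ofList ring_ids) ring_ids.headI
          (PySem.Set.ofList ring_ids).length).length := by
      intro hqp
      set rs := PySem.Set.ofList ring_ids
      set s := ring_ids.headI
      set m := rs.length
      have hclosedB : pvClosed nm rs (pvIter nm rs s m) := pvIter_closed nm rs s hnd hs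
      have hsB : s ∈ pvIter nm rs s m :=
        pvIter_mono nm rs s 0 m (Nat.zero_le _) s ((pvIter_mem_zero nm rs s s).mpr rfl)
      have hforward : ∀ y ∈ bfsA nm rs PySem.Set.empty [s] hqp, y ∈ pvIter nm rs s m := by
        apply bfsA_subset
        · intro x hx; simp [PySem.Set.empty] at hx
        · intro x hx
          have : x = s := by simpa using hx
          exact this ▸ hsB
        · exact hclosedB
      have hsA : s ∈ bfsA nm rs PySem.Set.empty [s] hqp :=
        bfsA_mem_start nm rs PySem.Set.empty [s] hqp s (Or.inr List.mem_cons_self)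
      have hclosedA : pvClosed nm rs (bfsA nm rs PySem.Set.empty [s] hqp) := by
        apply bfsA_closed
        intro r hr; simp [PySem.Set.empty] at hr
      have hback : ∀ y ∈ pvIter nm rs s m, y ∈ bfsA nm rs PySem.Set.empty [s] hqp :=
        pvIter_sub_closed nm rs s _ hsA hclosedA m
      apply pvLen_eq
      · apply bfsA_nodup; simp [PySem.Set.empty]
      · exact pvIter_nodup nm rs s m
      · intro y; exact ⟨hforward y, hback y⟩
    rw [key _]
    rfl
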